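-- pv_equiv track=rewrite | github.com/yunndlalala/dynamic_earthquake_triggering | v2.0/Detect_DynamicTriggering_v2.0/dyntrigger/utils/pyTOOL/grep_KUNMING_amp.py | get_not0
-- ===== SOURCE A (Python) =====
-- def get_not0(str,end_index):
--     i=end_index
--     while i >=0 :
--         if str[i]==' ':
--             begin_index=i+1
--             break
--         else:
--             i=i-1
--     out_str=str[begin_index:end_index+1]
--     return out_str
-- ===== SOURCE B (Python) =====
-- def get_not0(str, end_index):
--     for i in range(end_index + 1):
--         if str[i] == ' ':
--             begin_index = i + 1
--     return str[begin_index:end_index + 1]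
-- ===== Notes on version B (the rewrite author's own statement) =====
-- stated objective: alternative
-- what changed: Replaces A's backward early-break while-loop (scan down from end_index until the first space) by a single full forward pass over str[0:end_index+1] that keeps overwriting begin_index at every space, so no break and no backward index arithmetic are needed.
import Mathlib
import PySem

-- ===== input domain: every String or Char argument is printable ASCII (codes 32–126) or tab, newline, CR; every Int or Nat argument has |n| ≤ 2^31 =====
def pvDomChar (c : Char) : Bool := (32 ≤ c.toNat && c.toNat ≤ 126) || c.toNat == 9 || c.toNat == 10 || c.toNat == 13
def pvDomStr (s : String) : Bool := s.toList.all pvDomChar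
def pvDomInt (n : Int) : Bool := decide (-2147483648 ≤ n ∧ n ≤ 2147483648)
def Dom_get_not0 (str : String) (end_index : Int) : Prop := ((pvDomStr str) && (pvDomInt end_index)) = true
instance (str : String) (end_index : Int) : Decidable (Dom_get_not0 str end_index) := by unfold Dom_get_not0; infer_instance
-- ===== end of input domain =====

-- B replaces A's backward early-break scan by one full forward pass over str[0:end_index+1] that overwrites begin_index at every space (alternative decomposition, same cost).

-- ===== PORT A =====
-- A's while loop: scan i = end_index, end_index-1, … while i >= 0; on str[i] == ' ' set
-- begin_index = i+1 and break.  'none' is A's raising path (IndexError from str[i] out of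
-- range, or falling off the loop with begin_index unbound = UnboundLocalError).
def get_not0_loop (cs : List Char) (i : Int) : Option Int :=
  if _h : 0 ≤ i then
    match PySem.List.pyGet? cs i with
    | none => none                                   -- IndexError on str[i]
    | some c => if c = ' ' then some (i + 1) else get_not0_loop cs (i - 1)
  else none                                          -- begin_index never assigned
termination_by (i + 1).toNat
decreasing_by omega

def get_not0 (str : String) (end_index : Int) : String :=
  match get_not0_loop str.toList end_index with
  | some begin_index => PySem.Str.slice str (some begin_index) (some (end_index + 1))
  | none => ""                                       -- unreachable under Pre_get_not0 (A raises here)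

-- ===== PORT B =====
-- B's for-loop over range(end_index+1): acc is the current binding of begin_index (none =
-- still unbound); outer 'none' is B's raising path (IndexError from str[i]).
def get_not0_alt_scan (cs : List Char) : List Int → Option Int → Option (Option Int)
  | [], acc => some acc
  | i :: rest, acc =>
      match PySem.List.pyGet? cs i with
      | none => none                                   -- IndexError on str[i]
      | some c => get_not0_alt_scan cs rest (if c = ' ' then some (i + 1) else acc)

def get_not0_alt (str : String) (end_index : Int) : String :=
  match get_not0_alt_scan str.toList (PySem.List.pyRange 0 (end_index + 1) 1) none with
  | some (some begin_index) => PySem.Str.slice str (some begin_index) (some (end_index + 1))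
  | _ => ""                                            -- unreachable under Pre_get_not0 (B raises here)

-- ===== PRECONDITION & SPEC =====
-- Pre_: exactly where A returns: end_index a valid non-negative index and a space somewhere in str[0:end_index+1].
def Pre_get_not0 (str : String) (end_index : Int) : Prop :=
  0 ≤ end_index ∧ end_index < (str.toList.length : Int) ∧ ' ' ∈ str.toList.take (end_index + 1).toNat
instance (str : String) (end_index : Int) : Decidable (Pre_get_not0 str end_index) := by
  unfold Pre_get_not0; infer_instance

def pvWitness_get_not0 : String × Int := (" ab c", 4)

def Spec_get_not0 (str : String) (end_index : Int) (out : String) : Prop := out = get_not0_alt str end_index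
instance (str : String) (end_index : Int) (out : String) : Decidable (Spec_get_not0 str end_index out) := by unfold Spec_get_not0; infer_instance

-- ===== CLAIM (what is proved, stated in full; the proofs are below) =====
def Claim_equal_get_not0 : Prop := ∀ (str : String) (end_index : Int), Dom_get_not0 str end_index → Pre_get_not0 str end_index → Spec_get_not0 str end_index (get_not0 str end_index)
-- ===== LEMMAS AND PROOFS =====

-- Index of the last space at position ≤ j in cs (-1 if none): the common characterisation of
-- A's backward break-loop and of B's forward overwrite-loop.
def lastSp (cs : List Char) : Nat → Int
  | 0 => if cs[0]? = some ' ' then 0 else -1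
  | j + 1 => if cs[j + 1]? = some ' ' then (j : Int) + 1 else lastSp cs j

theorem loop_neg_one (cs : List Char) : get_not0_loop cs (-1) = none := by
  rw [get_not0_loop]; simp

theorem loop_eq_lastSp (cs : List Char) (k : Nat) (h : k < cs.length) :
    get_not0_loop cs (k : Int) =
      (if lastSp cs k = -1 then none else some (lastSp cs k + 1)) := by
  induction k with
  | zero =>
      rw [get_not0_loop]
      simp [lastSp, List.getElem?_eq_getElem h, PySem.List.pyGet?, PySem.List.pyIdx?]
      split <;> simp_all [loop_neg_one]
  | succ k ih =>
      rw [get_not0_loop]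
      have hget : PySem.List.pyGet? cs ((k : Int) + 1) = some cs[k + 1] := by
        have := PySem.List.pyGet?_natCast cs (k + 1)
        simp only [List.getElem?_eq_getElem h] at this
        push_cast at this
        exact this
      have hk0 : (0 : Int) ≤ (k : Int) + 1 := by omega
      push_cast
      rw [dif_pos hk0, hget]
      show (if cs[k + 1] = ' ' then some ((k : Int) + 1 + 1)
            else get_not0_loop cs ((k : Int) + 1 - 1)) = _
      by_cases hc : cs[k + 1] = ' '
      · have hl : lastSp cs (k + 1) = (k : Int) + 1 := by
          simp [lastSp, List.getElem?_eq_getElem h, hc]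
        rw [if_pos hc, hl, if_neg (by omega)]
      · have hl : lastSp cs (k + 1) = lastSp cs k := by
          have : cs[k + 1]? ≠ some ' ' := by
            rw [List.getElem?_eq_getElem h]; simpa using hc
          simp [lastSp, this]
        have h1 : (k : Int) + 1 - 1 = (k : Int) := by omega
        rw [if_neg hc, h1, ih (by omega), hl]

theorem scan_append (cs : List Char) (l1 l2 : List Int) (acc : Option Int) :
    get_not0_alt_scan cs (l1 ++ l2) acc =
      (get_not0_alt_scan cs l1 acc).bind (get_not0_alt_scan cs l2) := by
  induction l1 generalizing acc with
  | nil => rfl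
  | cons i rest ih =>
      rw [List.cons_append, get_not0_alt_scan, get_not0_alt_scan]
      cases PySem.List.pyGet? cs i with
      | none => rfl
      | some c => exact ih _

theorem scan_eq_lastSp (cs : List Char) (k : Nat) (h : k < cs.length) (acc : Option Int) :
    get_not0_alt_scan cs (PySem.List.pyRange 0 ((k : Int) + 1) 1) acc =
      some (if lastSp cs k = -1 then acc else some (lastSp cs k + 1)) := by
  induction k generalizing acc with
  | zero =>
      rw [show ((0 : Nat) : Int) + 1 = 0 + 1 by omega, PySem.List.pyRange_one_singleton,
        get_not0_alt_scan]
      have hget : PySem.List.pyGet? cs (0 : Int) = some cs[0] := by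
        have := PySem.List.pyGet?_natCast cs 0
        simp only [List.getElem?_eq_getElem h] at this
        push_cast at this
        exact this
      rw [hget]
      show some (if cs[0] = ' ' then some ((0 : Int) + 1) else acc) = _
      simp [lastSp, List.getElem?_eq_getElem h]
      split <;> simp_all
  | succ k ih =>
      have hsplit : PySem.List.pyRange 0 (((k + 1 : Nat) : Int) + 1) 1 =
          PySem.List.pyRange 0 ((k : Int) + 1) 1 ++ [(k : Int) + 1] := by
        push_cast
        exact PySem.List.pyRange_one_succ_right (by omega)
      rw [hsplit, scan_append, ih (by omega)]
      have hget : PySem.List.pyGet? cs ((k : Int) + 1) = some cs[k + 1] := by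
        have := PySem.List.pyGet?_natCast cs (k + 1)
        simp only [List.getElem?_eq_getElem h] at this
        push_cast at this
        exact this
      rw [Option.bind_some, get_not0_alt_scan, hget]
      show some (if cs[k + 1] = ' ' then some ((k : Int) + 1 + 1)
            else if lastSp cs k = -1 then acc else some (lastSp cs k + 1)) = _
      by_cases hc : cs[k + 1] = ' '
      · have hl : lastSp cs (k + 1) = (k : Int) + 1 := by
          simp [lastSp, List.getElem?_eq_getElem h, hc]
        rw [if_pos hc, hl, if_neg (by omega)]
      · have hl : lastSp cs (k + 1) = lastSp cs k := by
          have : cs[k + 1]? ≠ some ' ' := by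
            rw [List.getElem?_eq_getElem h]; simpa using hc
          simp [lastSp, this]
        rw [if_neg hc, hl]

theorem lastSp_ne_neg_one (cs : List Char) (k : Nat) (hj : ∃ j, j ≤ k ∧ cs[j]? = some ' ') :
    lastSp cs k ≠ -1 := by
  induction k with
  | zero =>
      obtain ⟨j, hj1, hj2⟩ := hj
      interval_cases j
      simp [lastSp, hj2]
  | succ k ih =>
      obtain ⟨j, hj1, hj2⟩ := hj
      rw [lastSp]
      by_cases hc : cs[k + 1]? = some ' '
      · rw [if_pos hc]; omega
      · have hjk : j ≤ k := by
          by_contra hgt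
          have hje : j = k + 1 := by omega
          exact hc (hje ▸ hj2)
        rw [if_neg hc]
        exact ih ⟨j, hjk, hj2⟩

theorem mem_take_exists (cs : List Char) (k : Nat) (h : ' ' ∈ cs.take (k + 1)) :
    ∃ j, j ≤ k ∧ cs[j]? = some ' ' := by
  obtain ⟨j, hv⟩ := List.mem_iff_getElem?.1 h
  have hj : j < k + 1 := by
    by_contra hge
    rw [List.getElem?_eq_none (by simp; omega)] at hv
    exact absurd hv (by simp)
  refine ⟨j, by omega, ?_⟩
  rwa [List.getElem?_take_of_lt hj] at hv

-- ===== VERDICT (by name: the statement is the Claim_ definition above) =====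
theorem get_not0_spec : Claim_equal_get_not0 := by
  intro str e _ hpre
  obtain ⟨h0, hlt, hmem⟩ := hpre
  unfold Spec_get_not0 get_not0 get_not0_alt
  set cs := str.toList with hcs
  set k := e.toNat with hk
  have hek : e = (k : Int) := by omega
  have hklen : k < cs.length := by omega
  have hex : ∃ j, j ≤ k ∧ cs[j]? = some ' ' := by
    apply mem_take_exists
    have h1 : (e + 1).toNat = k + 1 := by omega
    rw [← h1]; exact hmem
  have hne : lastSp cs k ≠ -1 := lastSp_ne_neg_one cs k hex
  have hloop : get_not0_loop cs e = some (lastSp cs k + 1) := by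
    rw [hek, loop_eq_lastSp cs k hklen, if_neg hne]
  have hscan : get_not0_alt_scan cs (PySem.List.pyRange 0 (e + 1) 1) none =
      some (some (lastSp cs k + 1)) := by
    rw [hek, scan_eq_lastSp cs k hklen, if_neg hne]
  rw [hloop, hscan]
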